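-- pv_equiv track=rewrite | github.com/Celeevo/moex_store | tools/diagnose_futures.py | _duplicate_groups
-- ===== SOURCE A (Python) =====
-- def _duplicate_groups(history_rows):
--     # Дубли группируем по базовому активу и дате экспирации.
--     # Это помогает увидеть пары вроде EuH8 / EuH8_2018.
--     groups = {}
--     for item in history_rows:
--         key = f"{item[4]}|{item[3]}"
--         groups.setdefault(key, []).append(item)
--
--     return {
--         key: value
--         for key, value in groups.items()
--         if len(value) > 1
--     }
-- ===== SOURCE B (Python) =====
-- def _duplicate_groups(history_rows):
--     # Two-pass counting strategy: first count key multiplicities, then build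
--     # only the duplicate groups directly (no full grouping followed by a filter).
--     counts = {}
--     for item in history_rows:
--         k = f"{item[4]}|{item[3]}"
--         counts[k] = counts.get(k, 0) + 1
--     result = {}
--     for item in history_rows:
--         k = f"{item[4]}|{item[3]}"
--         if counts[k] > 1:
--             result.setdefault(k, []).append(item)
--     return result
-- ===== Notes on version B (the rewrite author's own statement) =====
-- stated objective: alternative
-- what changed: A groups every row into a dict and then filters the groups by length; B first counts key multiplicities in one pass and then builds only the duplicate groups in a second pass, never materializing singleton groups.
import Mathlib
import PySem

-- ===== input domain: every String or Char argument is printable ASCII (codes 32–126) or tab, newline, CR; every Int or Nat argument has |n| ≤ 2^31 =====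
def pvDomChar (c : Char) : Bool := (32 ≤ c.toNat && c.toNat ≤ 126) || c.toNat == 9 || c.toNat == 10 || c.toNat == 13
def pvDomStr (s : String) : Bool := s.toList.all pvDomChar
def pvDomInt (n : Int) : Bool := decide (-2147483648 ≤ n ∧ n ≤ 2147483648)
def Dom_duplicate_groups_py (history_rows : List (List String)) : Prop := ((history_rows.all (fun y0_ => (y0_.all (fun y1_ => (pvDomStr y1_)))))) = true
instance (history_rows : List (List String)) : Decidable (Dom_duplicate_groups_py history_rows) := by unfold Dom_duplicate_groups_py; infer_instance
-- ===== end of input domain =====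

-- B is an alternative same-cost algorithm: count key multiplicities first, then build only the duplicate groups.

-- key = f"{item[4]}|{item[3]}" (both Pythons compute this; outside Pre_ the lookup raises IndexError)
def pvKey (row : List String) : String :=
  ((PySem.List.pyGet? row 4).getD "") ++ "|" ++ ((PySem.List.pyGet? row 3).getD "")

-- ===== PORT A =====
def duplicate_groups_py (history_rows : List (List String)) : List (String × List (List String)) :=
  let groups : PySem.Dict String (List (List String)) :=
    history_rows.foldl (fun d item => d.modify (pvKey item) [] (fun v => v ++ [item])) PySem.Dict.empty
  groups.items.filter (fun p => decide (1 < p.2.length))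

-- ===== PORT B =====
def duplicate_groups_py_alt (history_rows : List (List String)) : List (String × List (List String)) :=
  let counts : PySem.Dict String Int :=
    history_rows.foldl (fun d item => d.insert (pvKey item) (d.getD (pvKey item) 0 + 1)) PySem.Dict.empty
  let result : PySem.Dict String (List (List String)) :=
    history_rows.foldl
      (fun d item =>
        if 1 < counts.getD (pvKey item) 0 then d.modify (pvKey item) [] (fun v => v ++ [item]) else d)
      PySem.Dict.empty
  result.items

-- ===== PRECONDITION & SPEC =====
-- Pre_ excludes exactly the inputs where A raises IndexError (a row with fewer than 5 fields).
def Pre_duplicate_groups_py (history_rows : List (List String)) : Prop :=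
  ∀ row ∈ history_rows, 5 ≤ row.length
instance (history_rows : List (List String)) : Decidable (Pre_duplicate_groups_py history_rows) := by
  unfold Pre_duplicate_groups_py; infer_instance

def pvWitness_duplicate_groups_py : List (List String) :=
  [["a","b","c","d","e"], ["x","y","z","d","e"]]

def Spec_duplicate_groups_py (history_rows : List (List String)) (out : List (String × List (List String))) : Prop := out = duplicate_groups_py_alt history_rows
instance (history_rows : List (List String)) (out : List (String × List (List String))) : Decidable (Spec_duplicate_groups_py history_rows out) := by unfold Spec_duplicate_groups_py; infer_instance

-- ===== CLAIM (what is proved, stated in full; the proofs are below) =====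
def Claim_equal_duplicate_groups_py : Prop := ∀ (history_rows : List (List String)), Dom_duplicate_groups_py history_rows → Pre_duplicate_groups_py history_rows → Spec_duplicate_groups_py history_rows (duplicate_groups_py history_rows)

-- ===== LEMMAS AND PROOFS =====

-- set(filter) = filter(set): dedup-by-first-occurrence commutes with filter
theorem pvOfList_filter {α : Type} [BEq α] [LawfulBEq α] (p : α → Bool) (l : List α) :
    PySem.Set.ofList (l.filter p) = (PySem.Set.ofList l).filter p := by
  induction l using List.reverseRecOn with
  | nil => simp [PySem.Set.ofList_nil]
  | append_singleton xs x ih =>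
    rw [PySem.Set.ofList_append_singleton, PySem.Set.add_eq_ite, List.filter_append]
    by_cases hp : p x = true
    · simp only [List.filter_cons, hp, if_true, List.filter_nil]
      rw [PySem.Set.ofList_append_singleton, ih, PySem.Set.add_eq_ite]
      by_cases hx : x ∈ PySem.Set.ofList xs
      · rw [if_pos (List.mem_filter.mpr ⟨hx, hp⟩), if_pos hx]
      · rw [if_neg (fun h => hx (List.mem_filter.mp h).1), if_neg hx, List.filter_append]
        simp [hp]
    · simp only [List.filter_cons, hp, Bool.false_eq_true, if_false, List.filter_nil, List.append_nil]
      rw [ih]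
      by_cases hx : x ∈ PySem.Set.ofList xs
      · rw [if_pos hx]
      · rw [if_neg hx, List.filter_append]
        simp [hp]

-- the grouping fold of A, characterised: items are first-occurrence-deduped keys, each paired with its rows
theorem pvGroup_items (l : List (List String)) :
    (l.foldl (fun d item => d.modify (pvKey item) [] (fun v => v ++ [item]))
      (PySem.Dict.empty : PySem.Dict String (List (List String)))).items
    = (PySem.Set.ofList (l.map pvKey)).map
        (fun k => (k, l.filter (fun r => pvKey r == k))) := by
  have hnd := PySem.Dict.nodup_keys_foldl_modify_key l pvKey []
    (fun _ item v => v ++ [item]) PySem.Dict.empty (by simp [PySem.Dict.keys_empty])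
  rw [PySem.Dict.items_eq_map_keys _ hnd ([] : List (List String))]
  rw [PySem.Dict.keys_foldl_modify_key l pvKey [] (fun _ item v => v ++ [item]) PySem.Dict.empty]
  rw [PySem.Dict.keys_empty, PySem.Set.update_nil_left]
  refine List.map_congr_left (fun k _ => ?_)
  have hfold : l.foldl (fun d item => d.modify (pvKey item) [] (fun v => v ++ [item]))
      (PySem.Dict.empty : PySem.Dict String (List (List String)))
      = (l.map (fun r => (pvKey r, r))).foldl
          (fun d p => d.modify p.1 [] (fun v => v ++ [p.2])) PySem.Dict.empty := by
    rw [List.foldl_map]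
  rw [hfold, PySem.Dict.getD_foldl_modify_append, PySem.Dict.getD_empty]
  simp [List.filter_map, List.map_map, Function.comp_def]

-- filter-by-group-size equals count of the key
theorem pvLen_filter_eq_count (l : List (List String)) (k : String) :
    (l.filter (fun r => pvKey r == k)).length = (l.map pvKey).count k := by
  rw [List.count_eq_countP, List.countP_map, ← List.countP_eq_length_filter]
  rfl

-- ===== VERDICT (by name: the statement is the Claim_ definition above) =====
theorem duplicate_groups_py_spec : Claim_equal_duplicate_groups_py := by
  intro rows _ _
  unfold Spec_duplicate_groups_py duplicate_groups_py duplicate_groups_py_alt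
  simp only []
  -- the counting dict of B is the multiset of keys
  have hcnt : ∀ c, (rows.foldl (fun d item => d.insert (pvKey item) (d.getD (pvKey item) 0 + 1))
      (PySem.Dict.empty : PySem.Dict String Int)).getD c 0 = ((rows.map pvKey).count c : Int) := by
    intro c
    rw [show (rows.foldl (fun d item => d.insert (pvKey item) (d.getD (pvKey item) 0 + 1))
        (PySem.Dict.empty : PySem.Dict String Int))
        = (rows.map pvKey).foldl (fun d x => d.insert x (d.getD x 0 + 1)) PySem.Dict.empty
      from by rw [List.foldl_map]]
    rw [PySem.Dict.getD_foldl_insert_add_one, PySem.Dict.getD_empty]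
    ring
  -- B's second loop is the grouping fold over the rows whose key is duplicated
  rw [PySem.List.foldl_ite_eq_foldl_filter]
  have hq : (rows.filter (fun item => decide (1 <
        (rows.foldl (fun d item => d.insert (pvKey item) (d.getD (pvKey item) 0 + 1))
          (PySem.Dict.empty : PySem.Dict String Int)).getD (pvKey item) 0)))
      = rows.filter (fun item => decide (1 < (rows.map pvKey).count (pvKey item))) := by
    refine List.filter_congr (fun x _ => ?_)
    rw [hcnt (pvKey x)]
    simp
  rw [hq, pvGroup_items, pvGroup_items]
  rw [List.filter_map]
  -- the deduped keys of the filtered rows are the filtered deduped keys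
  have hkeys : (rows.filter (fun item => decide (1 < (rows.map pvKey).count (pvKey item)))).map pvKey
      = (rows.map pvKey).filter (fun c => decide (1 < (rows.map pvKey).count c)) := by
    rw [List.filter_map]; simp [Function.comp_def]
  rw [hkeys, pvOfList_filter]
  have hpred : ((fun p => decide (1 < p.2.length)) ∘
        (fun k => (k, List.filter (fun r => pvKey r == k) rows)))
      = (fun c => decide (1 < List.count c (List.map pvKey rows))) := by
    funext k
    simp only [Function.comp_apply]
    rw [pvLen_filter_eq_count]
  rw [hpred]
  refine List.map_congr_left (fun k hk => ?_)
  have hk2 : decide (1 < List.count k (List.map pvKey rows)) = true := (List.mem_filter.mp hk).2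
  refine congrArg (Prod.mk k) ?_
  rw [List.filter_filter]
  refine (List.filter_congr (fun x _ => ?_)).symm
  by_cases h : pvKey x == k
  · have hx : pvKey x = k := eq_of_beq h
    simp [hx, hk2]
  · simp [h]
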